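-- pv_equiv track=rewrite | github.com/vinchinzu/euler | python/835.py | sum_powers
-- ===== SOURCE A (Python) =====
-- def pow_mod(base: int, exp: int, mod: int) -> int:
--     """Modular exponentiation."""
--     result = 1
--     base = base % mod
--     while exp > 0:
--         if exp & 1:
--             result = (result * base) % mod
--         base = (base * base) % mod
--         exp >>= 1
--     return result
--
-- def sum_powers(n: int, k: int, mod: int) -> int:
--     """Sum of k-th powers from 1 to n mod mod."""
--     if k == 0:
--         return n % mod
--     if k == 1:
--         return (n * (n + 1) // 2) % mod
--     if k == 2:
--         return (n * (n + 1) * (2 * n + 1) // 6) % mod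
--     # For higher powers, use Faulhaber's formula (simplified)
--     result = 0
--     for i in range(1, n + 1):
--         result = (result + pow_mod(i, k, mod)) % mod
--     return result
-- ===== SOURCE B (Python) =====
-- import math
--
-- def sum_powers(n: int, k: int, mod: int) -> int:
--     """Sum of k-th powers from 1 to n mod mod."""
--     if k == 0:
--         return n % mod
--     if k == 1:
--         return (n * (n + 1) // 2) % mod
--     if k == 2:
--         return (n * (n + 1) * (2 * n + 1) // 6) % mod
--     if n <= 0:
--         return 0
--     if k <= 100:
--         # Faulhaber via the telescoping recurrence: s[j] = sum_{i=1}^n i**j, exact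
--         # integers, O(k^2) operations independent of n; one final reduction.
--         s = [n]  # s[0]
--         for j in range(1, k + 1):
--             total = (n + 1) ** (j + 1) - 1
--             for t in range(j):
--                 total -= math.comb(j + 1, t) * s[t]
--             s.append(total // (j + 1))
--         return s[-1] % mod
--     # large k: i**k mod m is periodic in i with period m = abs(mod);
--     # count how many i in 1..n fall in each residue class.
--     m = abs(mod)
--     q = n // m
--     rem = n % m
--     total = 0
--     for r in range(1, min(m, n) + 1):
--         cnt = q + 1 if r <= rem else q
--         total += cnt * pow(r, k, m)
--     return total % mod
-- ===== Notes on version B (the rewrite author's own statement) =====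
-- stated objective: faster
-- what changed: Replaces A's O(n) loop of per-term hand-rolled binary modular exponentiations with an exact Faulhaber telescoping recurrence (O(k^2) integer operations, independent of n) for k <= 100, and for larger k with a residue-class counting loop that exploits the period-|mod| structure of i^k mod m (O(min(n,|mod|)) builtin pow calls), reducing mod once at the end.
import Mathlib
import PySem

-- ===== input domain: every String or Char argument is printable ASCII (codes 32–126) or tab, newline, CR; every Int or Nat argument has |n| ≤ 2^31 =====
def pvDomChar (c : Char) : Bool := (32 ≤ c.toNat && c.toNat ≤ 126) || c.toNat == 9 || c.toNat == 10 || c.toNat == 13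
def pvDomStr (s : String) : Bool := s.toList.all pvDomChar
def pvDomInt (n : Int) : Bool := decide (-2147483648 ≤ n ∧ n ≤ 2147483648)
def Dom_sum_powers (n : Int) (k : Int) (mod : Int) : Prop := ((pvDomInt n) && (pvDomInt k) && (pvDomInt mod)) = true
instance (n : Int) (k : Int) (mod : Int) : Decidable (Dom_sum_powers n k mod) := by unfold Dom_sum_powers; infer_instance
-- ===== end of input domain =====

-- B replaces A's loop of per-term hand-rolled modular exponentiations by Faulhaber's telescoping
-- recurrence (exact integer power sum, independent of n) for small k, and by a residue-class
-- counting loop (i^k mod m is periodic in i with period |mod|) for large k; one final reduction.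

-- ===== PORT A =====
-- pow_mod's while loop: state result/base/exp; 'exp >>= 1' strictly decreases exp.toNat while exp > 0
def powModLoop (result : Int) (base : Int) (exp : Int) (m : Int) : Int :=
  if _h : 0 < exp then
    powModLoop (if PySem.Int.band exp 1 ≠ 0 then PySem.Int.mod (result * base) m else result)
      (PySem.Int.mod (base * base) m) (exp >>> (1:Nat)) m
  else result
termination_by exp.toNat
decreasing_by
  have h1 : exp >>> (1:Nat) = exp / 2 := by rw [Int.shiftRight_eq_div_pow]; norm_num
  omega

def pow_mod (base : Int) (exp : Int) (m : Int) : Int :=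
  powModLoop 1 (PySem.Int.mod base m) exp m

def sum_powers (n : Int) (k : Int) (mod : Int) : Int :=
  if k = 0 then PySem.Int.mod n mod
  else if k = 1 then PySem.Int.mod (PySem.Int.floordiv (n * (n + 1)) 2) mod
  else if k = 2 then PySem.Int.mod (PySem.Int.floordiv (n * (n + 1) * (2 * n + 1)) 6) mod
  else
    (PySem.List.pyRange 1 (n + 1) 1).foldl
      (fun result i => PySem.Int.mod (result + pow_mod i k mod) mod) 0

-- ===== PORT B =====
def sum_powers_alt (n : Int) (k : Int) (mod : Int) : Int :=
  if k = 0 then PySem.Int.mod n mod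
  else if k = 1 then PySem.Int.mod (PySem.Int.floordiv (n * (n + 1)) 2) mod
  else if k = 2 then PySem.Int.mod (PySem.Int.floordiv (n * (n + 1) * (2 * n + 1)) 6) mod
  else if n ≤ 0 then 0
  else if k ≤ 100 then
    let s := (PySem.List.pyRange 1 (k + 1) 1).foldl
      (fun s j =>
        s ++ [PySem.Int.floordiv
          ((PySem.List.pyRange 0 j 1).foldl
            (fun total t => total - (Nat.choose (j + 1).toNat t.toNat : Int) * PySem.List.pyGetD s t 0)
            ((n + 1) ^ (j + 1).toNat - 1))
          (j + 1)]) [n]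
    PySem.Int.mod (PySem.List.pyGetD s (-1) 0) mod
  else
    -- large k: i**k mod m is periodic in i with period m = abs(mod)
    let m := |mod|
    let q := PySem.Int.floordiv n m
    let rem := PySem.Int.mod n m
    let total := (PySem.List.pyRange 1 (min m n + 1) 1).foldl
      (fun total r => total + (if r ≤ rem then q + 1 else q) * PySem.Int.powMod r k.toNat m) 0
    PySem.Int.mod total mod

-- ===== PRECONDITION & SPEC =====
-- Pre_ excludes exactly mod = 0, where both Pythons raise ZeroDivisionError.
def Pre_sum_powers (n : Int) (k : Int) (mod : Int) : Prop := mod ≠ 0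
instance (n : Int) (k : Int) (mod : Int) : Decidable (Pre_sum_powers n k mod) := by unfold Pre_sum_powers; infer_instance
def pvWitness_sum_powers : Int × Int × Int := (5, 3, 7)

def Spec_sum_powers (n : Int) (k : Int) (mod : Int) (out : Int) : Prop := out = sum_powers_alt n k mod
instance (n : Int) (k : Int) (mod : Int) (out : Int) : Decidable (Spec_sum_powers n k mod out) := by unfold Spec_sum_powers; infer_instance

-- ===== CLAIM (what is proved, stated in full; the proofs are below) =====
def Claim_equal_sum_powers : Prop := ∀ (n : Int) (k : Int) (mod : Int), Dom_sum_powers n k mod → Pre_sum_powers n k mod → Spec_sum_powers n k mod (sum_powers n k mod)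

-- ===== LEMMAS AND PROOFS =====

-- the exact power sum S_t(N) = 1^t + 2^t + … + N^t
def SP (N : Nat) (t : Nat) : Int := ∑ i ∈ Finset.range N, ((i : ℤ) + 1) ^ t

-- PySem.Int.mod is Int.fmod; congruent arguments give equal fmod
theorem fmod_congr {m a b : Int} (h : a ≡ b [ZMOD m]) : Int.fmod a m = Int.fmod b m := by
  obtain ⟨t, ht⟩ := Int.modEq_iff_dvd.mp h
  have hb : b = a + m * t := by linarith
  rw [hb, Int.add_mul_fmod_self_left]

theorem fmod_modEq (a m : Int) : Int.fmod a m ≡ a [ZMOD m] := by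
  rw [Int.modEq_iff_dvd]
  exact ⟨Int.fdiv a m, by have := Int.fmod_add_mul_fdiv a m; linarith⟩

-- binary exponentiation computes fmod (r * b^e) m
theorem powModLoop_eq (m : Int) : ∀ (N : Nat) (e : Int), e.toNat = N → 1 ≤ e →
    ∀ (r b : Int), powModLoop r b e m = Int.fmod (r * b ^ e.toNat) m := by
  intro N
  induction N using Nat.strong_induction_on with
  | _ N ih =>
    intro e hN he r b
    rw [powModLoop, dif_pos (by omega : (0:Int) < e)]
    have hsh : e >>> (1:Nat) = e / 2 := by rw [Int.shiftRight_eq_div_pow]; norm_num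
    have hband : PySem.Int.band e 1 = e % 2 := by
      rw [PySem.Int.band_one, PySem.Int.mod_eq_emod_of_pos (by norm_num)]
    by_cases h1 : e = 1
    · subst h1
      have hb11 : PySem.Int.band 1 1 ≠ (0 : Int) := by decide
      rw [if_pos hb11]
      rw [show ((1:Int) >>> (1:Nat)) = 0 from rfl]
      rw [powModLoop, dif_neg (by norm_num)]
      rw [show ((1:Int).toNat) = 1 from rfl, pow_one]
      rfl
    · -- e ≥ 2
      have he2 : 2 ≤ e := by omega
      have hq : 1 ≤ e / 2 := by omega
      have hrec := ih (e / 2).toNat (by omega) (e / 2) rfl hq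
      rw [hsh, hband]
      by_cases hpar : e % 2 = 0
      · rw [if_neg (by omega)]
        rw [hrec r (PySem.Int.mod (b * b) m)]
        apply fmod_congr
        have hbb : PySem.Int.mod (b * b) m ≡ b * b [ZMOD m] := fmod_modEq (b * b) m
        calc r * PySem.Int.mod (b * b) m ^ (e / 2).toNat
            ≡ r * (b * b) ^ (e / 2).toNat [ZMOD m] := (hbb.pow _).mul_left r
          _ = r * b ^ e.toNat := by
              rw [show b * b = b ^ 2 by ring, ← pow_mul]
              congr 2
              omega
      · rw [if_pos (by omega)]
        rw [hrec (PySem.Int.mod (r * b) m) (PySem.Int.mod (b * b) m)]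
        apply fmod_congr
        have hbb : PySem.Int.mod (b * b) m ≡ b * b [ZMOD m] := fmod_modEq (b * b) m
        have hrb : PySem.Int.mod (r * b) m ≡ r * b [ZMOD m] := fmod_modEq (r * b) m
        calc PySem.Int.mod (r * b) m * PySem.Int.mod (b * b) m ^ (e / 2).toNat
            ≡ (r * b) * (b * b) ^ (e / 2).toNat [ZMOD m] := hrb.mul (hbb.pow _)
          _ = r * b ^ e.toNat := by
              rw [show b * b = b ^ 2 by ring, ← pow_mul]
              rw [mul_assoc, ← pow_succ']
              congr 2
              omega

theorem pow_mod_eq (b e m : Int) (he : 1 ≤ e) : pow_mod b e m = Int.fmod (b ^ e.toNat) m := by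
  unfold pow_mod
  rw [powModLoop_eq m e.toNat e rfl he]
  exact fmod_congr (by simpa [one_mul] using ((fmod_modEq b m).pow e.toNat).mul_left 1)

theorem pow_mod_of_nonpos (b e m : Int) (he : e ≤ 0) : pow_mod b e m = 1 := by
  unfold pow_mod
  rw [powModLoop, dif_neg (by omega)]

-- A's accumulation loop (k ≥ 1)
theorem pymod_eq_fmod (a b : Int) : PySem.Int.mod a b = Int.fmod a b := rfl

theorem SP_succ (N t : Nat) : SP (N + 1) t = SP N t + ((N : ℤ) + 1) ^ t := by
  rw [SP, SP, Finset.sum_range_succ]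

theorem foldA (k m : Int) (hk : 1 ≤ k) : ∀ N : Nat,
    (PySem.List.pyRange 1 ((N : Int) + 1) 1).foldl
        (fun result i => PySem.Int.mod (result + pow_mod i k m) m) 0
      = Int.fmod (SP N k.toNat) m := by
  intro N
  induction N with
  | zero =>
      rw [show ((0:Nat):Int) + 1 = 1 by norm_num]
      rw [PySem.List.pyRange_one_eq_nil le_rfl]
      simp [SP, Int.zero_fmod]
  | succ N ihN =>
      rw [show (((N+1:Nat)):Int) + 1 = ((N:Int) + 1) + 1 by push_cast; ring]
      rw [PySem.List.pyRange_one_succ_right (by omega : (1:Int) ≤ (N:Int)+1)]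
      rw [List.foldl_append]
      simp only [List.foldl_cons, List.foldl_nil]
      rw [ihN, pow_mod_eq _ _ _ hk, pymod_eq_fmod]
      apply fmod_congr
      rw [SP_succ]
      exact (fmod_modEq (SP N k.toNat) m).add (fmod_modEq (((N:Int)+1) ^ k.toNat) m)

-- A's accumulation loop when k < 0 (pow_mod returns 1 each time)
theorem foldANeg (k m : Int) (hk : k < 0) : ∀ N : Nat,
    (PySem.List.pyRange 1 ((N : Int) + 1) 1).foldl
        (fun result i => PySem.Int.mod (result + pow_mod i k m) m) 0
      = Int.fmod (N : Int) m := by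
  intro N
  induction N with
  | zero =>
      rw [show ((0:Nat):Int) + 1 = 1 by norm_num]
      rw [PySem.List.pyRange_one_eq_nil le_rfl]
      simp [Int.zero_fmod]
  | succ N ihN =>
      rw [show (((N+1:Nat)):Int) + 1 = ((N:Int) + 1) + 1 by push_cast; ring]
      rw [PySem.List.pyRange_one_succ_right (by omega : (1:Int) ≤ (N:Int)+1)]
      rw [List.foldl_append]
      simp only [List.foldl_cons, List.foldl_nil]
      rw [ihN, pow_mod_of_nonpos _ _ _ (by omega), pymod_eq_fmod]
      rw [show (((N+1:Nat)):Int) = (N:Int) + 1 by push_cast; ring]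
      exact fmod_congr ((fmod_modEq (N:Int) m).add_right 1)

-- generic subtraction loop
theorem foldl_sub_map (f : Int → Int) : ∀ (l : List Int) (i : Int),
    l.foldl (fun a x => a - f x) i = i - (l.map f).sum := by
  intro l
  induction l with
  | nil => simp
  | cons x t ih => intro i; simp [ih]; ring

theorem sum_map_range (g : Nat → Int) : ∀ n : Nat, ((List.range n).map g).sum = ∑ i ∈ Finset.range n, g i := by
  intro n
  induction n with
  | zero => simp
  | succ n ih => rw [List.range_succ, Finset.sum_range_succ, List.map_append, List.sum_append, ih]; simp

-- binomial: ∑_{t<e} C(e,t) x^t = (x+1)^e - x^e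
theorem binom_partial (x : Int) (e : Nat) :
    ∑ t ∈ Finset.range e, (Nat.choose e t : ℤ) * x ^ t = (x + 1) ^ e - x ^ e := by
  have h := add_pow x 1 e
  simp only [one_pow, mul_one] at h
  rw [Finset.sum_range_succ] at h
  have : ∀ t, x ^ t * (Nat.choose e t : ℤ) = (Nat.choose e t : ℤ) * x ^ t := fun t => mul_comm _ _
  simp only [this] at h
  rw [Nat.choose_self] at h
  push_cast at h
  linarith

-- Faulhaber's telescoping identity
theorem faulhaber (N e : Nat) :
    ∑ t ∈ Finset.range e, (Nat.choose e t : ℤ) * SP N t = ((N : ℤ) + 1) ^ e - 1 := by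
  unfold SP
  calc ∑ t ∈ Finset.range e, (Nat.choose e t : ℤ) * ∑ i ∈ Finset.range N, ((i : ℤ) + 1) ^ t
      = ∑ t ∈ Finset.range e, ∑ i ∈ Finset.range N, (Nat.choose e t : ℤ) * ((i : ℤ) + 1) ^ t := by
        refine Finset.sum_congr rfl fun t _ => Finset.mul_sum _ _ _
    _ = ∑ i ∈ Finset.range N, ∑ t ∈ Finset.range e, (Nat.choose e t : ℤ) * ((i : ℤ) + 1) ^ t :=
        Finset.sum_comm
    _ = ∑ i ∈ Finset.range N, ((((i : ℤ) + 1) + 1) ^ e - ((i : ℤ) + 1) ^ e) := by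
        refine Finset.sum_congr rfl fun i _ => binom_partial _ e
    _ = ((N : ℤ) + 1) ^ e - 1 := by
        have h := Finset.sum_range_sub (fun i : ℕ => ((i : ℤ) + 1) ^ e) N
        push_cast at h
        simpa using h

-- B's outer loop builds [SP N 0, …, SP N J]
theorem foldB (n : Int) (hn : 1 ≤ n) : ∀ J : Nat,
    (PySem.List.pyRange 1 ((J : Int) + 1) 1).foldl
      (fun s j =>
        s ++ [PySem.Int.floordiv
          ((PySem.List.pyRange 0 j 1).foldl
            (fun total t => total - (Nat.choose (j + 1).toNat t.toNat : Int) * PySem.List.pyGetD s t 0)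
            ((n + 1) ^ (j + 1).toNat - 1))
          (j + 1)]) [n]
    = (List.range (J + 1)).map (SP n.toNat) := by
  have hnn : ((n.toNat : Int)) = n := Int.toNat_of_nonneg (by omega)
  intro J
  induction J with
  | zero =>
      rw [show ((0:Nat):Int) + 1 = 1 by norm_num, PySem.List.pyRange_one_eq_nil le_rfl]
      simp only [List.foldl_nil]
      simp [SP, hnn]
  | succ J ih =>
      rw [show (((J+1:Nat)):Int) + 1 = ((J:Int) + 1) + 1 by push_cast; ring]
      rw [PySem.List.pyRange_one_succ_right (by omega : (1:Int) ≤ (J:Int)+1)]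
      rw [List.foldl_append]
      simp only [List.foldl_cons, List.foldl_nil]
      rw [ih]
      rw [show J + 1 + 1 = (J + 1) + 1 from rfl, List.range_succ (n := J + 1),
          List.map_append, List.map_cons, List.map_nil]
      congr 1
      congr 1
      -- the inner subtraction loop
      rw [foldl_sub_map
        (fun t => (Nat.choose (((J:Int)+1) + 1).toNat t.toNat : Int) *
          PySem.List.pyGetD ((List.range (J + 1)).map (SP n.toNat)) t 0)]
      rw [show (J:Int) + 1 = ((J + 1 : Nat) : Int) by push_cast; ring]
      rw [PySem.List.pyRange_zero_nat (J + 1)]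
      rw [List.map_map]
      rw [List.map_congr_left (g := fun T : Nat => (Nat.choose (J + 2) T : Int) * SP n.toNat T)
        (fun T hT => by
          have hTlt : T < J + 1 := List.mem_range.mp hT
          simp only [Function.comp]
          rw [show ((((J + 1 : Nat) : Int)) + 1).toNat = J + 2 by omega]
          rw [Int.toNat_natCast]
          rw [PySem.List.pyGetD_natCast]
          rw [List.getD_eq_getElem _ _ (by simpa using hTlt)]
          rw [List.getElem_map, List.getElem_range])]
      rw [sum_map_range]
      have hf := faulhaber n.toNat (J + 2)
      rw [Finset.sum_range_succ] at hf
      have hch : (Nat.choose (J + 2) (J + 1) : Int) = (J : Int) + 2 := by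
        rw [Nat.choose_succ_self_right]; push_cast; ring
      rw [hch, hnn] at hf
      rw [show ((((J + 1 : Nat) : Int)) + 1).toNat = J + 2 by omega]
      have htot : (n + 1) ^ (J + 2) - 1 -
          ∑ T ∈ Finset.range (J + 1), (Nat.choose (J + 2) T : Int) * SP n.toNat T
          = (((J + 1 : Nat) : Int) + 1) * SP n.toNat (J + 1) := by
        push_cast
        linarith
      rw [htot]
      rw [show PySem.Int.floordiv ((((J + 1 : Nat) : Int) + 1) * SP n.toNat (J + 1))
            (((J + 1 : Nat) : Int) + 1) = Int.fdiv ((((J + 1 : Nat) : Int) + 1) * SP n.toNat (J + 1))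
            (((J + 1 : Nat) : Int) + 1) from rfl]
      exact Int.mul_fdiv_cancel_left _ (by push_cast; omega)

theorem pyGetD_append_last (l : List Int) (x d : Int) : PySem.List.pyGetD (l ++ [x]) (-1) d = x := by
  simp [PySem.List.pyGetD, PySem.List.pyGet?, PySem.List.pyIdx?]

-- ===== periodic path (k > 100) =====

theorem foldl_add_map {A : Type} (f : A → Int) : ∀ (l : List A) (i : Int),
    l.foldl (fun a x => a + f x) i = i + (l.map f).sum := by
  intro l
  induction l with
  | nil => simp
  | cons x t ih => intro i; simp [ih]; ring

theorem sum_modEq (m : Int) (s : Finset ℕ) (f g : ℕ → Int)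
    (h : ∀ x ∈ s, f x ≡ g x [ZMOD m]) :
    (∑ x ∈ s, f x) ≡ (∑ x ∈ s, g x) [ZMOD m] := by
  induction s using Finset.induction_on with
  | empty => simp
  | insert x s hx ih =>
      rw [Finset.sum_insert hx, Finset.sum_insert hx]
      exact (h x (Finset.mem_insert_self x s)).add (ih fun y hy => h y (Finset.mem_insert_of_mem hy))

theorem sum_shift_one (g : ℤ → ℤ) (a : ℤ) (Mn : Nat) :
    (∑ i ∈ Finset.range Mn, g ((a + 1) + i))
      = (∑ i ∈ Finset.range Mn, g (a + i)) - g a + g (a + Mn) := by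
  have h1 := Finset.sum_range_succ (fun i => g (a + i)) Mn
  have h2 := Finset.sum_range_succ' (fun i => g (a + i)) Mn
  simp only [Nat.cast_zero, add_zero, Nat.cast_add, Nat.cast_one] at h1 h2
  have h3 : (∑ i ∈ Finset.range Mn, g (a + (↑i + 1))) = ∑ i ∈ Finset.range Mn, g ((a + 1) + i) := by
    refine Finset.sum_congr rfl fun i _ => ?_
    exact congrArg g (by ring)
  rw [h3] at h2
  linarith [h1, h2]

theorem SP_add (a b t : Nat) : SP (a + b) t = SP a t + ∑ i ∈ Finset.range b, (((a : ℤ) + i) + 1) ^ t := by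
  induction b with
  | zero => simp
  | succ b ih =>
      rw [show a + (b + 1) = (a + b) + 1 from rfl, SP_succ, ih, Finset.sum_range_succ]
      push_cast; ring

theorem window (Mn K : Nat) (a : Nat) :
    (∑ i ∈ Finset.range Mn, (((a : ℤ) + i) + 1) ^ K) ≡ SP Mn K [ZMOD (Mn : ℤ)] := by
  induction a with
  | zero =>
      have he : (∑ i ∈ Finset.range Mn, (((0 : Nat) : ℤ) + i + 1) ^ K) = SP Mn K := by
        rw [SP]; exact Finset.sum_congr rfl fun i _ => by push_cast; ring
      rw [he]
  | succ a ih =>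
      have hc : (∑ i ∈ Finset.range Mn, (((a + 1 : Nat) : ℤ) + i + 1) ^ K)
          = (∑ i ∈ Finset.range Mn, (fun x : ℤ => (x + 1) ^ K) (((a : ℤ) + 1) + i)) := by
        refine Finset.sum_congr rfl fun i _ => ?_
        push_cast; ring
      rw [hc, sum_shift_one (fun x : ℤ => (x + 1) ^ K) (a : ℤ) Mn]
      have hcong : ((a : ℤ) + Mn + 1) ^ K ≡ ((a : ℤ) + 1) ^ K [ZMOD (Mn : ℤ)] := by
        have hbase : ((a : ℤ) + Mn + 1) ≡ ((a : ℤ) + 1) [ZMOD (Mn : ℤ)] := by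
          rw [Int.modEq_iff_dvd]; exact ⟨-1, by ring⟩
        exact hbase.pow K
      have h := (ih.sub (Int.ModEq.refl (((a : ℤ) + 1) ^ K))).add hcong
      have hfin : SP Mn K - ((a : ℤ) + 1) ^ K + ((a : ℤ) + 1) ^ K = SP Mn K := by ring
      rw [hfin] at h
      exact h

theorem blocks (Mn K : Nat) : ∀ (Q Rn : Nat),
    SP (Q * Mn + Rn) K ≡ (Q : ℤ) * SP Mn K + SP Rn K [ZMOD (Mn : ℤ)] := by
  intro Q
  induction Q with
  | zero => intro Rn; simpa using Int.ModEq.refl (SP Rn K)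
  | succ Q ih =>
      intro Rn
      have hsplit : (Q + 1) * Mn + Rn = (Q * Mn + Rn) + Mn := by ring
      rw [hsplit, SP_add]
      have h := (ih Rn).add (window Mn K (Q * Mn + Rn))
      have hr : (Q : ℤ) * SP Mn K + SP Rn K + SP Mn K = ((Q + 1 : Nat) : ℤ) * SP Mn K + SP Rn K := by
        push_cast; ring
      rw [hr] at h
      exact h

theorem ite_sum_prefix (K : Nat) : ∀ (L Rn : Nat), Rn ≤ L →
    (∑ j ∈ Finset.range L, (if j < Rn then ((j : ℤ) + 1) ^ K else 0)) = SP Rn K := by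
  intro L
  induction L with
  | zero => intro Rn h; interval_cases Rn; simp [SP]
  | succ L ih =>
      intro Rn h
      by_cases hR : Rn = L + 1
      · subst hR
        rw [SP]
        refine Finset.sum_congr rfl fun j hj => ?_
        rw [if_pos (Finset.mem_range.mp hj)]
      · rw [Finset.sum_range_succ, if_neg (by omega), add_zero]
        exact ih Rn (by omega)

theorem foldPeriodic (n k mod : Int) (hn : 1 ≤ n) (hk1 : 1 ≤ k) (hm : mod ≠ 0) :
    Int.fmod
      ((PySem.List.pyRange 1 (min |mod| n + 1) 1).foldl
        (fun total r => total +
          (if r ≤ PySem.Int.mod n |mod| then PySem.Int.floordiv n |mod| + 1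
           else PySem.Int.floordiv n |mod|) * PySem.Int.powMod r k.toNat |mod|) 0) mod
    = Int.fmod (SP n.toNat k.toNat) mod := by
  have habs0 : (0:ℤ) < |mod| := abs_pos.mpr hm
  obtain ⟨Mn, hMn⟩ : ∃ Mn : Nat, (Mn : ℤ) = |mod| := ⟨(|mod|).toNat, Int.toNat_of_nonneg (by omega)⟩
  obtain ⟨N, hN⟩ : ∃ N : Nat, (N : ℤ) = n := ⟨n.toNat, Int.toNat_of_nonneg (by omega)⟩
  have hQ0 : 0 ≤ PySem.Int.floordiv n |mod| := Int.fdiv_nonneg (by omega) (by omega)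
  have hR0 : 0 ≤ PySem.Int.mod n |mod| := PySem.Int.mod_nonneg n habs0
  have hRM : PySem.Int.mod n |mod| < |mod| := PySem.Int.mod_lt n habs0
  have heq : PySem.Int.floordiv n |mod| * |mod| + PySem.Int.mod n |mod| = n :=
    PySem.Int.floordiv_mul_add_mod n |mod|
  obtain ⟨Qn, hQn⟩ : ∃ Qn : Nat, (Qn : ℤ) = PySem.Int.floordiv n |mod| :=
    ⟨(PySem.Int.floordiv n |mod|).toNat, Int.toNat_of_nonneg hQ0⟩
  obtain ⟨Rn, hRn⟩ : ∃ Rn : Nat, (Rn : ℤ) = PySem.Int.mod n |mod| :=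
    ⟨(PySem.Int.mod n |mod|).toNat, Int.toNat_of_nonneg hR0⟩
  have hQM : 0 ≤ PySem.Int.floordiv n |mod| * |mod| := mul_nonneg hQ0 (by omega)
  -- the loop as a Finset sum
  have hLcast : min |mod| n = ((min Mn N : Nat) : ℤ) := by
    rw [← hMn, ← hN, Nat.cast_min]
  rw [PySem.List.pyRange_one]
  rw [show min |mod| n + 1 - 1 = ((min Mn N : Nat) : ℤ) by rw [hLcast]; ring]
  rw [Int.toNat_natCast]
  rw [List.foldl_map]
  rw [foldl_add_map (fun j : Nat =>
    (if 1 + (j : ℤ) ≤ PySem.Int.mod n |mod| then PySem.Int.floordiv n |mod| + 1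
     else PySem.Int.floordiv n |mod|) * PySem.Int.powMod (1 + (j : ℤ)) k.toNat |mod|)]
  rw [zero_add, sum_map_range]
  apply fmod_congr
  refine Int.ModEq.of_dvd ((dvd_abs mod mod).mpr dvd_rfl) ?_
  -- step 1: drop the inner reduction of powMod
  have hstep1 : (∑ j ∈ Finset.range (min Mn N),
        (if 1 + (j : ℤ) ≤ PySem.Int.mod n |mod| then PySem.Int.floordiv n |mod| + 1
         else PySem.Int.floordiv n |mod|) * PySem.Int.powMod (1 + (j : ℤ)) k.toNat |mod|)
      ≡ (∑ j ∈ Finset.range (min Mn N),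
        (if 1 + (j : ℤ) ≤ PySem.Int.mod n |mod| then PySem.Int.floordiv n |mod| + 1
         else PySem.Int.floordiv n |mod|) * ((j : ℤ) + 1) ^ k.toNat) [ZMOD |mod|] := by
    refine sum_modEq _ _ _ _ fun j _ => ?_
    rw [show (1 + (j : ℤ)) = ((j : ℤ) + 1) from by ring]
    rw [PySem.Int.powMod_eq]
    rw [pymod_eq_fmod (((j : ℤ) + 1) ^ k.toNat) |mod|]
    exact Int.ModEq.mul_left _ (fmod_modEq _ _)
  refine hstep1.trans ?_
  -- step 2: evaluate the sum exactly
  have hRle : Rn ≤ min Mn N := by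
    have h1 : PySem.Int.mod n |mod| ≤ n := by omega
    have h2 : (Rn : ℤ) ≤ ((min Mn N : Nat) : ℤ) := by
      rw [hRn, ← hLcast]
      exact le_min (by omega) h1
    exact_mod_cast h2
  have hstep2 : (∑ j ∈ Finset.range (min Mn N),
        (if 1 + (j : ℤ) ≤ PySem.Int.mod n |mod| then PySem.Int.floordiv n |mod| + 1
         else PySem.Int.floordiv n |mod|) * ((j : ℤ) + 1) ^ k.toNat)
      = (Qn : ℤ) * SP (min Mn N) k.toNat + SP Rn k.toNat := by
    have hterm : ∀ j ∈ Finset.range (min Mn N),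
        (if 1 + (j : ℤ) ≤ PySem.Int.mod n |mod| then PySem.Int.floordiv n |mod| + 1
         else PySem.Int.floordiv n |mod|) * ((j : ℤ) + 1) ^ k.toNat
        = (Qn : ℤ) * ((j : ℤ) + 1) ^ k.toNat + (if j < Rn then ((j : ℤ) + 1) ^ k.toNat else 0) := by
      intro j _
      by_cases hc : j < Rn
      · rw [if_pos (show 1 + (j : ℤ) ≤ PySem.Int.mod n |mod| by omega), if_pos hc, ← hQn]
        ring
      · rw [if_neg (show ¬ (1 + (j : ℤ) ≤ PySem.Int.mod n |mod|) by omega), if_neg hc, ← hQn]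
        ring
    rw [Finset.sum_congr rfl hterm, Finset.sum_add_distrib, ← Finset.mul_sum]
    rw [ite_sum_prefix k.toNat (min Mn N) Rn hRle]
    rfl
  rw [hstep2]
  -- step 3: relate to SP N
  by_cases hcase : (Mn : ℤ) ≤ n
  · -- at least one full block: min = Mn and N = Qn * Mn + Rn
    have hminMn : min Mn N = Mn := by
      have h1 : (Mn : ℤ) ≤ (N : ℤ) := by rw [hN]; exact hcase
      have := Int.ofNat_le.mp h1
      omega
    have hNsplit : N = Qn * Mn + Rn := by
      have h1 : (Qn : ℤ) * (Mn : ℤ) + (Rn : ℤ) = (N : ℤ) := by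
        rw [hQn, hMn, hRn, hN]; exact heq
      have h2 : ((Qn * Mn + Rn : Nat) : ℤ) = (N : ℤ) := by push_cast; linarith
      exact_mod_cast h2.symm
    have hb := blocks Mn k.toNat Qn Rn
    rw [hMn] at hb
    rw [hminMn, show n.toNat = N by omega, hNsplit]
    exact hb.symm
  · -- n < |mod|: no full block, the sum is exact
    have hq0 : PySem.Int.floordiv n |mod| = 0 := by
      rcases lt_or_ge (PySem.Int.floordiv n |mod|) 1 with h | h
      · omega
      · exfalso
        have h2 : |mod| ≤ PySem.Int.floordiv n |mod| * |mod| :=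
          le_mul_of_one_le_left (by omega) h
        omega
    have hprod0 : PySem.Int.floordiv n |mod| * |mod| = 0 := by rw [hq0]; ring
    have hr : PySem.Int.mod n |mod| = n := by omega
    have hQnz : Qn = 0 := by omega
    have hRnN : Rn = N := by
      have h1 : (Rn : ℤ) = (N : ℤ) := by rw [hRn, hr, hN]
      exact_mod_cast h1
    have hminN : min Mn N = N := by
      have hlt : (N : ℤ) < (Mn : ℤ) := by rw [hN, hMn]; omega
      have := Int.ofNat_lt.mp hlt
      omega
    rw [hQnz, hRnN, hminN, show n.toNat = N by omega]
    simpa using Int.ModEq.refl (SP N k.toNat)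

-- ===== VERDICT (by name: the statement is the Claim_ definition above) =====
theorem sum_powers_spec : Claim_equal_sum_powers := by
  intro n k m _ hm
  have hm' : m ≠ 0 := hm
  unfold Spec_sum_powers
  simp only [sum_powers, sum_powers_alt]
  by_cases hk0 : k = 0
  · simp [hk0]
  by_cases hk1 : k = 1
  · simp [hk1]
  by_cases hk2 : k = 2
  · simp [hk2]
  simp only [if_neg hk0, if_neg hk1, if_neg hk2]
  by_cases hn : n ≤ 0
  · rw [if_pos hn]
    rw [PySem.List.pyRange_one_eq_nil (by omega : n + 1 ≤ 1)]
    rfl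
  · rw [if_neg hn]
    have hn1 : (1:Int) ≤ n := by omega
    have hnn : ((n.toNat : Int)) = n := Int.toNat_of_nonneg (by omega)
    by_cases hkneg : k < 0
    · -- k < 0: pow_mod returns 1 each iteration; both sides are n mod m
      rw [if_pos (by omega : k ≤ 100)]
      rw [PySem.List.pyRange_one_eq_nil (by omega : k + 1 ≤ 1)]
      simp only [List.foldl_nil]
      rw [show PySem.List.pyGetD [n] (-1) 0 = n from pyGetD_append_last [] n 0]
      rw [show n + 1 = (n.toNat : Int) + 1 by omega]
      rw [foldANeg k m hkneg n.toNat]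
      rw [pymod_eq_fmod, hnn]
    · -- k ≥ 3
      have hk3 : (3:Int) ≤ k := by omega
      by_cases hk100 : k ≤ 100
      case neg =>
        -- k > 100: the periodic path
        rw [if_neg hk100]
        rw [show n + 1 = (n.toNat : Int) + 1 by omega]
        rw [foldA k m (by omega) n.toNat]
        rw [pymod_eq_fmod]
        exact (foldPeriodic n k m (by omega) (by omega) hm').symm
      rw [if_pos hk100]
      rw [show k + 1 = (k.toNat : Int) + 1 by omega]
      rw [foldB n hn1 k.toNat]
      rw [List.range_succ, List.map_append, List.map_cons, List.map_nil]
      rw [pyGetD_append_last]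
      rw [show n + 1 = (n.toNat : Int) + 1 by omega]
      rw [foldA k m (by omega) n.toNat]
      rw [pymod_eq_fmod]
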